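-- pv_equiv track=rewrite | github.com/YannickLongval/combinatorics | generating_functions/dice.py | isDup
-- ===== SOURCE A (Python) =====
-- def isDup(die, lst):
--     for d in lst:
--         dup = True
--         for e in die:
--             if(d.count(e) != die.count(e)):
--                 dup = False
--         for e in d:
--             if(die.count(e) != d.count(e)):
--                 dup = False
--         if(dup):
--             return True
--     return
-- ===== SOURCE B (Python) =====
-- def isDup(die, lst):
--     s = sorted(die)
--     for d in lst:
--         if sorted(d) == s:
--             return True
--     return
-- ===== Notes on version B (the rewrite author's own statement) =====
-- stated objective: faster
-- what changed: Replaces A's per-candidate two-way quadratic .count scans with sorting die once and comparing sorted(d) == s per candidate.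
import Mathlib
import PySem

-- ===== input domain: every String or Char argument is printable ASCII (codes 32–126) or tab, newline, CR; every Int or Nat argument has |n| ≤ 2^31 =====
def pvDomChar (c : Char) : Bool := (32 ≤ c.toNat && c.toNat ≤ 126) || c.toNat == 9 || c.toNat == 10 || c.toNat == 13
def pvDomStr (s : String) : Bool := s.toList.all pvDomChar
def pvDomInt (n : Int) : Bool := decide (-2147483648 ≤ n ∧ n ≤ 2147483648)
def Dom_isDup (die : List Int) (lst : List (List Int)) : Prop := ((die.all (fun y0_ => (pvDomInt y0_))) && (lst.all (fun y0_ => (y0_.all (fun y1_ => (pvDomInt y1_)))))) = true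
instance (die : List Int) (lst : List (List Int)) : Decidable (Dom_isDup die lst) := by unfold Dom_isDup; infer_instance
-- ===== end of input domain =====

-- B replaces A's per-candidate two-way .count scans by sorting die once and comparing sorted(d) == s (simpler).

-- ===== PORT A =====
-- the outer 'for d in lst' with its early 'return True'; the two inner count-comparison
-- loops are folds over the Python flag 'dup'
def isDupGoA (die : List Int) : List (List Int) → Option Bool
  | [] => none
  | d :: rest =>
    let dup := true
    let dup := die.foldl (fun dup e => if PySem.List.count d e ≠ PySem.List.count die e then false else dup) dup
    let dup := d.foldl (fun dup e => if PySem.List.count die e ≠ PySem.List.count d e then false else dup) dup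
    if dup then some true else isDupGoA die rest

def isDup (die : List Int) (lst : List (List Int)) : Option Bool := isDupGoA die lst

-- ===== PORT B =====
def isDupGoB (s : List Int) : List (List Int) → Option Bool
  | [] => none
  | d :: rest => if PySem.List.sorted d (fun x => x) false = s then some true else isDupGoB s rest

def isDup_alt (die : List Int) (lst : List (List Int)) : Option Bool :=
  let s := PySem.List.sorted die (fun x => x) false
  isDupGoB s lst

-- ===== PRECONDITION & SPEC =====
def Spec_isDup (die : List Int) (lst : List (List Int)) (out : Option Bool) : Prop := out = isDup_alt die lst
instance (die : List Int) (lst : List (List Int)) (out : Option Bool) : Decidable (Spec_isDup die lst out) := by unfold Spec_isDup; infer_instance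

-- ===== CLAIM (what is proved, stated in full; the proofs are below) =====
def Claim_equal_isDup : Prop := ∀ (die : List Int) (lst : List (List Int)), Dom_isDup die lst → Spec_isDup die lst (isDup die lst)

-- ===== LEMMAS AND PROOFS =====

-- the Python flag loop: dup stays true iff no element fails the test
theorem flag_foldl {α : Type} (p : α → Prop) [DecidablePred p] :
    ∀ (xs : List α) (acc : Bool),
      xs.foldl (fun dup e => if p e then false else dup) acc = (acc && xs.all (fun e => !(decide (p e)))) := by
  intro xs
  induction xs with
  | nil => intro acc; simp
  | cons x t ih =>
    intro acc
    rw [List.foldl_cons, ih]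
    by_cases h : p x <;> simp [h]

-- A's per-candidate acceptance test equals B's sorted comparison
theorem step_iff (die d : List Int) :
    ((∀ e ∈ die, PySem.List.count d e = PySem.List.count die e) ∧
     (∀ e ∈ d, PySem.List.count die e = PySem.List.count d e))
    ↔ PySem.List.sorted d (fun x => x) false = PySem.List.sorted die (fun x => x) false := by
  rw [PySem.List.sorted_id_eq_sorted_id_iff_perm, List.perm_iff_count]
  constructor
  · rintro ⟨h1, h2⟩ a
    by_cases ha : a ∈ die
    · have := h1 a ha; simp [PySem.List.count_eq] at this; omega
    · by_cases hd : a ∈ d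
      · have := h2 a hd; simp [PySem.List.count_eq] at this; omega
      · simp [List.count_eq_zero_of_not_mem ha, List.count_eq_zero_of_not_mem hd]
  · intro h
    constructor
    · intro e _; simp [PySem.List.count_eq, h e]
    · intro e _; simp [PySem.List.count_eq, h e]

theorem go_eq (die : List Int) :
    ∀ lst, isDupGoA die lst = isDupGoB (PySem.List.sorted die (fun x => x) false) lst := by
  intro lst
  induction lst with
  | nil => rfl
  | cons d rest ih =>
    show (let dup := true
          let dup := die.foldl (fun dup e => if PySem.List.count d e ≠ PySem.List.count die e then false else dup) dup
          let dup := d.foldl (fun dup e => if PySem.List.count die e ≠ PySem.List.count d e then false else dup) dup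
          if dup then some true else isDupGoA die rest) = _
    simp only [flag_foldl]
    have hs := step_iff die d
    have cond : ((true && die.all (fun e => !(decide (PySem.List.count d e ≠ PySem.List.count die e)))) &&
                 d.all (fun e => !(decide (PySem.List.count die e ≠ PySem.List.count d e))))
               = decide (PySem.List.sorted d (fun x => x) false = PySem.List.sorted die (fun x => x) false) := by
      by_cases h : PySem.List.sorted d (fun x => x) false = PySem.List.sorted die (fun x => x) false
      · obtain ⟨h1, h2⟩ := hs.mpr h
        have e1 : die.all (fun e => !(decide (PySem.List.count d e ≠ PySem.List.count die e))) = true := by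
          rw [List.all_eq_true]; intro e he
          have := h1 e he; simp [PySem.List.count_eq] at this ⊢; omega
        have e2 : d.all (fun e => !(decide (PySem.List.count die e ≠ PySem.List.count d e))) = true := by
          rw [List.all_eq_true]; intro e he
          have := h2 e he; simp [PySem.List.count_eq] at this ⊢; omega
        rw [e1, e2]; simp [h]
      · rw [decide_eq_false h]
        by_contra hb
        simp only [Bool.not_eq_false, Bool.and_eq_true, List.all_eq_true] at hb
        obtain ⟨⟨_, hb1⟩, hb2⟩ := hb
        apply h
        apply hs.mp
        constructor
        · intro e he; have := hb1 e he
          simp [PySem.List.count_eq] at this ⊢; omega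
        · intro e he; have := hb2 e he
          simp [PySem.List.count_eq] at this ⊢; omega
    rw [cond]
    by_cases h : PySem.List.sorted d (fun x => x) false = PySem.List.sorted die (fun x => x) false <;>
      simp [isDupGoB, h, ih]

-- ===== VERDICT (by name: the statement is the Claim_ definition above) =====
theorem isDup_spec : Claim_equal_isDup := by
  intro die lst _
  show isDup die lst = isDup_alt die lst
  simpa [isDup, isDup_alt] using go_eq die lst
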